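-- pv_equiv track=rewrite | github.com/Maiiruuu/DEVNSI | Code TD3/Bin2.py | binairehexa
-- ===== SOURCE A (Python) =====
-- def binairehexa(ficelle):
--         res = ""
--         while len(ficelle) > 4:
--             res = ficelle[-4:] + res
--             ficelle = ficelle[:-4]
--         res = ficelle + res
--         while len(res) % 4 != 0:
--             res = "0" + res
--         return res
-- ===== SOURCE B (Python) =====
-- def binairehexa(ficelle):
--     return "0" * ((-len(ficelle)) % 4) + ficelle
-- ===== Notes on version B (the rewrite author's own statement) =====
-- stated objective: simpler
-- what changed: Replaced the chunk-rebuilding while loop and the one-zero-at-a-time padding loop by a single closed-form expression that prepends (-len) % 4 zeros.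
import Mathlib
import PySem

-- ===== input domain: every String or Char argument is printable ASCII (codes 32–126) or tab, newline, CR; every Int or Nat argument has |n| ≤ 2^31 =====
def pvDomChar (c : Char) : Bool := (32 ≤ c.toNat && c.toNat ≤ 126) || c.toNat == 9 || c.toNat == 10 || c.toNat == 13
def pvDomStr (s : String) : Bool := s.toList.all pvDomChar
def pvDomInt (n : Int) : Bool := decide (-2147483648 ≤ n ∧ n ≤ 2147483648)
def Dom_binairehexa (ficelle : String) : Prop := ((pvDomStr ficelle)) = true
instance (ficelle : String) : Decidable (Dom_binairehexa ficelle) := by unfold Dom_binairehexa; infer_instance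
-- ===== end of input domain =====

-- B replaces A's two while loops by one closed-form padding expression (simpler, linear time).

-- ===== PORT A =====
-- while len(ficelle) > 4: res = ficelle[-4:] + res; ficelle = ficelle[:-4]
def binA_loop1 (f res : List Char) : List Char :=
  if 4 < f.length then
    binA_loop1 (PySem.List.slice f none (some (-4)))
               (PySem.List.slice f (some (-4)) none ++ res)
  else f ++ res
termination_by f.length
decreasing_by
  rw [PySem.List.slice_to_neg_ofNat f 4 (by omega)]
  simp [List.length_take]; omega

-- while len(res) % 4 != 0: res = "0" + res
def binA_loop2 (res : List Char) : List Char :=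
  if res.length % 4 ≠ 0 then binA_loop2 ('0' :: res) else res
termination_by ((4 - res.length % 4) % 4)
decreasing_by simp [List.length_cons]; omega

def binairehexa (ficelle : String) : String :=
  String.ofList (binA_loop2 (binA_loop1 ficelle.toList []))

-- ===== PORT B =====
def binairehexa_alt (ficelle : String) : String :=
  String.ofList (List.replicate ((Int.natAbs (PySem.Int.mod (-(ficelle.toList.length : Int)) 4))) '0' ++ ficelle.toList)

-- ===== PRECONDITION & SPEC =====
def Spec_binairehexa (ficelle : String) (out : String) : Prop := out = binairehexa_alt ficelle
instance (ficelle : String) (out : String) : Decidable (Spec_binairehexa ficelle out) := by unfold Spec_binairehexa; infer_instance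

-- ===== CLAIM (what is proved, stated in full; the proofs are below) =====
def Claim_equal_binairehexa : Prop := ∀ (ficelle : String), Dom_binairehexa ficelle → Spec_binairehexa ficelle (binairehexa ficelle)

-- ===== LEMMAS AND PROOFS =====
theorem binA_loop1_eq (f res : List Char) : binA_loop1 f res = f ++ res := by
  induction f, res using binA_loop1.induct with
  | case1 f res h ih =>
    rw [binA_loop1, if_pos h, ih,
        PySem.List.slice_to_neg_ofNat f 4 (by omega),
        PySem.List.slice_from_neg_ofNat f 4 (by omega)]
    rw [← List.append_assoc, List.take_append_drop]
  | case2 f res h =>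
    rw [binA_loop1, if_neg h]

theorem binA_loop2_aux (k : Nat) : ∀ (res : List Char), (4 - res.length % 4) % 4 = k →
    binA_loop2 res = List.replicate k '0' ++ res := by
  induction k with
  | zero =>
    intro res h
    have h0 : res.length % 4 = 0 := by omega
    rw [binA_loop2, if_neg (by omega)]
    simp
  | succ k ih =>
    intro res h
    have hne : res.length % 4 ≠ 0 := by omega
    rw [binA_loop2, if_pos hne,
        ih ('0' :: res) (by simp [List.length_cons]; omega),
        List.replicate_succ']
    simp

theorem binA_loop2_eq (res : List Char) :
    binA_loop2 res = List.replicate ((4 - res.length % 4) % 4) '0' ++ res :=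
  binA_loop2_aux _ res rfl

theorem pymod_eq (n : Nat) :
    Int.natAbs (PySem.Int.mod (-(n : Int)) 4) = (4 - n % 4) % 4 := by
  rw [PySem.Int.mod_eq_emod_of_pos (by omega)]
  omega

-- ===== VERDICT (by name: the statement is the Claim_ definition above) =====
theorem binairehexa_spec : Claim_equal_binairehexa := by
  intro ficelle _
  unfold Spec_binairehexa binairehexa binairehexa_alt
  rw [binA_loop1_eq, binA_loop2_eq, pymod_eq]
  simp
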